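-- pv_equiv track=rewrite | github.com/Mus1cBreaker/Hangman-Hyperskill | Problems/Markdown heading/task.py | heading
-- ===== SOURCE A (Python) =====
-- def heading(header, hashes=0):
--     pre_header = ""
--     for x in range(0, hashes):
--         pre_header += "#"
--         if x < 5:
--             x += 1
--         else:
--             break
--     if pre_header == "":
--         pre_header = "#"
--     return pre_header + " " + header
-- ===== SOURCE B (Python) =====
-- def heading(header, hashes=0):
--     return "#" * min(max(hashes, 1), 6) + " " + header
-- ===== Notes on version B (the rewrite author's own statement) =====
-- stated objective: simpler
-- what changed: Replaces the break-guarded character-accumulation loop and empty-prefix fallback by a closed-form hash count min(max(hashes,1),6) with string repetition.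
import Mathlib
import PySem

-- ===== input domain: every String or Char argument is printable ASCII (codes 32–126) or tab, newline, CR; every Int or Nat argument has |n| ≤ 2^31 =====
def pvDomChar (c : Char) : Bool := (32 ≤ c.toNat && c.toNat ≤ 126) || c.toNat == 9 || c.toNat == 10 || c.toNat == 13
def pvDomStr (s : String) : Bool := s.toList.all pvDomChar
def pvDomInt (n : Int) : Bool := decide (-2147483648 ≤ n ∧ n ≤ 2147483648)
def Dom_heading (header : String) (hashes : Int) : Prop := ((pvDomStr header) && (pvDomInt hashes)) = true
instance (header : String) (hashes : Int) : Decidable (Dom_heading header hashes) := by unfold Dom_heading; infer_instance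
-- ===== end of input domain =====

-- B replaces the break-guarded accumulation loop by string repetition of the closed-form count min(max(hashes,1),6) (simpler).


-- ===== PORT A =====
-- the for-loop with the break: process x's in order, stop after the x with ¬ x < 5
def headingLoopA : List Int → String → String
  | [], pre => pre
  | x :: rest, pre =>
      let pre := pre ++ "#"
      if x < 5 then headingLoopA rest pre else pre

def heading (header : String) (hashes : Int) : String :=
  let pre := headingLoopA (PySem.List.pyRange 0 hashes 1) ""
  let pre := if pre = "" then "#" else pre
  pre ++ " " ++ header

-- ===== PORT B =====
def heading_alt (header : String) (hashes : Int) : String :=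
  String.ofList (List.replicate (min (max hashes 1) 6).toNat '#') ++ " " ++ header

-- ===== PRECONDITION & SPEC =====
def Spec_heading (header : String) (hashes : Int) (out : String) : Prop := out = heading_alt header hashes
instance (header : String) (hashes : Int) (out : String) : Decidable (Spec_heading header hashes out) := by unfold Spec_heading; infer_instance

-- ===== CLAIM (what is proved, stated in full; the proofs are below) =====
def Claim_equal_heading : Prop := ∀ (header : String) (hashes : Int), Dom_heading header hashes → Spec_heading header hashes (heading header hashes)

-- ===== LEMMAS AND PROOFS =====

-- for hashes ≥ 6 the loop consumes 0,1,2,3,4,5 and breaks with "######"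
lemma loopA_big (hashes : Int) (h : 6 ≤ hashes) :
    headingLoopA (PySem.List.pyRange 0 hashes 1) "" = "######" := by
  rw [PySem.List.pyRange_one_cons (by omega : (0:Int) < hashes),
      PySem.List.pyRange_one_cons (by omega : (0+1:Int) < hashes),
      PySem.List.pyRange_one_cons (by omega : (0+1+1:Int) < hashes),
      PySem.List.pyRange_one_cons (by omega : (0+1+1+1:Int) < hashes),
      PySem.List.pyRange_one_cons (by omega : (0+1+1+1+1:Int) < hashes),
      PySem.List.pyRange_one_cons (by omega : (0+1+1+1+1+1:Int) < hashes)]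
  norm_num [headingLoopA]
  rfl

-- ===== VERDICT (by name: the statement is the Claim_ definition above) =====
theorem heading_spec : Claim_equal_heading := by
  intro header hashes _
  unfold Spec_heading
  by_cases hle : hashes ≤ 0
  · unfold heading heading_alt
    rw [PySem.List.pyRange_one_eq_nil (by omega)]
    have : (min (max hashes 1) 6).toNat = 1 := by omega
    rw [this]
    rfl
  · by_cases h6 : hashes < 6
    · interval_cases hashes <;> rfl
    · unfold heading heading_alt
      rw [loopA_big hashes (by omega)]
      have : (min (max hashes 1) 6).toNat = 6 := by omega
      rw [this]
      rfl
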